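-- pv_equiv track=rewrite | github.com/dev-Adhithiya/AIROS | ui/sidebar.py | _hand_svg
-- ===== SOURCE A (Python) =====
-- def _hand_svg(thumb, index, middle, ring, pinky, highlight_color="#00ff88"):
--     """Generate a simple SVG hand diagram. 1=extended, 0=closed."""
--     lines = []
--
--     # Palm base
--     lines.append('<rect x="18" y="45" width="24" height="20" rx="4" fill="#1a3040"/>')
--     lines.append('<ellipse cx="30" cy="65" rx="12" ry="8" fill="#1a3040"/>')
--
--     # Finger data: (base_x, base_y, tip_x_open, tip_y_open, tip_x_closed, tip_y_closed)
--     fingers = [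
--         # index
--         (24, 45, 20, 12, 23, 38),
--         # middle
--         (29, 43, 28,  8, 28, 36),
--         # ring
--         (34, 44, 36, 12, 33, 37),
--         # pinky
--         (38, 47, 44, 20, 38, 40),
--     ]
--     states = [index, middle, ring, pinky]
--     colors = [highlight_color if s else "#2a4050" for s in states]
--
--     for (bx, by, tx, ty, cx, cy), state, col in zip(fingers, states, colors):
--         if state:
--             lines.append(f'<line x1="{bx}" y1="{by}" x2="{tx}" y2="{ty}" stroke="{col}" stroke-width="4" stroke-linecap="round"/>')
--             lines.append(f'<circle cx="{tx}" cy="{ty}" r="3" fill="{col}"/>')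
--         else:
--             lines.append(f'<line x1="{bx}" y1="{by}" x2="{cx}" y2="{cy}" stroke="{col}" stroke-width="4" stroke-linecap="round"/>')
--
--     # Thumb
--     tcol = highlight_color if thumb else "#2a4050"
--     if thumb:
--         lines.append(f'<line x1="19" y1="52" x2="10" y2="42" stroke="{tcol}" stroke-width="4" stroke-linecap="round"/>')
--         lines.append(f'<circle cx="10" cy="42" r="3" fill="{tcol}"/>')
--     else:
--         lines.append(f'<line x1="19" y1="52" x2="14" y2="46" stroke="{tcol}" stroke-width="4" stroke-linecap="round"/>')
--
--     return (
--         '<svg xmlns="http://www.w3.org/2000/svg" viewBox="0 0 60 80" width="60" height="80">'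
--         + "".join(lines)
--         + "</svg>"
--     )
-- ===== SOURCE B (Python) =====
-- def _finger(bx, by, tx, ty, cx, cy, state, hc):
--     """SVG for one finger: line to open tip plus a tip circle when extended, line to closed tip otherwise."""
--     col = hc if state else "#2a4050"
--     if state:
--         return (f'<line x1="{bx}" y1="{by}" x2="{tx}" y2="{ty}" stroke="{col}" stroke-width="4" stroke-linecap="round"/>'
--                 f'<circle cx="{tx}" cy="{ty}" r="3" fill="{col}"/>')
--     return f'<line x1="{bx}" y1="{by}" x2="{cx}" y2="{cy}" stroke="{col}" stroke-width="4" stroke-linecap="round"/>'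
--
--
-- def _hand_svg(thumb, index, middle, ring, pinky, highlight_color="#00ff88"):
--     """Generate a simple SVG hand diagram. 1=extended, 0=closed."""
--     # One uniform table: (base_x, base_y, open_tip_x, open_tip_y, closed_tip_x, closed_tip_y, state);
--     # the thumb is just the last row.
--     table = [
--         (24, 45, 20, 12, 23, 38, index),
--         (29, 43, 28, 8, 28, 36, middle),
--         (34, 44, 36, 12, 33, 37, ring),
--         (38, 47, 44, 20, 38, 40, pinky),
--         (19, 52, 10, 42, 14, 46, thumb),
--     ]
--     return (
--         '<svg xmlns="http://www.w3.org/2000/svg" viewBox="0 0 60 80" width="60" height="80">'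
--         '<rect x="18" y="45" width="24" height="20" rx="4" fill="#1a3040"/>'
--         '<ellipse cx="30" cy="65" rx="12" ry="8" fill="#1a3040"/>'
--         + "".join(_finger(*row, highlight_color) for row in table)
--         + "</svg>"
--     )
-- ===== Notes on version B (the rewrite author's own statement) =====
-- stated objective: simpler
-- what changed: B replaces A's separate states/colors lists, zip loop and special-cased thumb if/else with one uniform five-row finger table (thumb as the last row) rendered by a single per-finger helper.
import Mathlib
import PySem

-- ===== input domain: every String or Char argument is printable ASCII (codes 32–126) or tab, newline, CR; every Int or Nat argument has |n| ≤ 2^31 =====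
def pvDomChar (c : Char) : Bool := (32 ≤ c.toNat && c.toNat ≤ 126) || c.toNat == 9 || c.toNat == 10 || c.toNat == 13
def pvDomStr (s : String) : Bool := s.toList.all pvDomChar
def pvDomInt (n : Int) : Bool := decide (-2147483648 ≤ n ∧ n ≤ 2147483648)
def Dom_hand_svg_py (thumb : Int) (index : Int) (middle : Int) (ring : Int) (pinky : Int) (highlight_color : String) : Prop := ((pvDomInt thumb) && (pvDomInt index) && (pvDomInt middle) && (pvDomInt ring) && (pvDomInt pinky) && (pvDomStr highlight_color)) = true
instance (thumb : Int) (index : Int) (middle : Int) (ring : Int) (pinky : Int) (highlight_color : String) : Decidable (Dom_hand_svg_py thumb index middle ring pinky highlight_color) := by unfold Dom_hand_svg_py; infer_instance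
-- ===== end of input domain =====

-- B folds the special-cased thumb into one uniform five-row finger table with a per-finger helper (simpler decomposition; same output).


-- ===== PORT A =====
-- A-side helpers: the two f-string templates, exact ASCII via PySem.Int.toStr
def pvFmtLineA (bx by_ tx ty : Int) (col : String) : String :=
  "<line x1=\"" ++ PySem.Int.toStr bx ++ "\" y1=\"" ++ PySem.Int.toStr by_ ++ "\" x2=\"" ++ PySem.Int.toStr tx ++ "\" y2=\"" ++ PySem.Int.toStr ty ++ "\" stroke=\"" ++ col ++ "\" stroke-width=\"4\" stroke-linecap=\"round\"/>"

def pvFmtCircleA (tx ty : Int) (col : String) : String :=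
  "<circle cx=\"" ++ PySem.Int.toStr tx ++ "\" cy=\"" ++ PySem.Int.toStr ty ++ "\" r=\"3\" fill=\"" ++ col ++ "\"/>"

def hand_svg_py (thumb : Int) (index : Int) (middle : Int) (ring : Int) (pinky : Int) (highlight_color : String) : String :=
  let lines0 : List String :=
    ["<rect x=\"18\" y=\"45\" width=\"24\" height=\"20\" rx=\"4\" fill=\"#1a3040\"/>",
     "<ellipse cx=\"30\" cy=\"65\" rx=\"12\" ry=\"8\" fill=\"#1a3040\"/>"]
  let fingers : List (Int × Int × Int × Int × Int × Int) :=
    [(24, 45, 20, 12, 23, 38), (29, 43, 28, 8, 28, 36), (34, 44, 36, 12, 33, 37), (38, 47, 44, 20, 38, 40)]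
  let states : List Int := [index, middle, ring, pinky]
  let colors : List String := states.map (fun s => if s ≠ 0 then highlight_color else "#2a4050")
  let lines1 : List String :=
    (List.zip (List.zip fingers states) colors).foldl (fun acc z =>
      match z with
      | (((bx, by_, tx, ty, cx, cy), state), col) =>
        if state ≠ 0 then
          acc ++ [pvFmtLineA bx by_ tx ty col, pvFmtCircleA tx ty col]
        else
          acc ++ [pvFmtLineA bx by_ cx cy col]) lines0
  let tcol : String := if thumb ≠ 0 then highlight_color else "#2a4050"
  let lines2 : List String :=
    if thumb ≠ 0 then
      lines1 ++ [pvFmtLineA 19 52 10 42 tcol, pvFmtCircleA 10 42 tcol]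
    else
      lines1 ++ [pvFmtLineA 19 52 14 46 tcol]
  "<svg xmlns=\"http://www.w3.org/2000/svg\" viewBox=\"0 0 60 80\" width=\"60\" height=\"80\">" ++ String.join lines2 ++ "</svg>"


-- ===== PORT B =====
-- B-side helper: one finger's SVG (line + tip circle when extended, line to closed tip otherwise)
def pvFingerB (bx by_ tx ty cx cy state : Int) (hc : String) : String :=
  let col : String := if state ≠ 0 then hc else "#2a4050"
  if state ≠ 0 then
    "<line x1=\"" ++ PySem.Int.toStr bx ++ "\" y1=\"" ++ PySem.Int.toStr by_ ++ "\" x2=\"" ++ PySem.Int.toStr tx ++ "\" y2=\"" ++ PySem.Int.toStr ty ++ "\" stroke=\"" ++ col ++ "\" stroke-width=\"4\" stroke-linecap=\"round\"/>" ++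
    "<circle cx=\"" ++ PySem.Int.toStr tx ++ "\" cy=\"" ++ PySem.Int.toStr ty ++ "\" r=\"3\" fill=\"" ++ col ++ "\"/>"
  else
    "<line x1=\"" ++ PySem.Int.toStr bx ++ "\" y1=\"" ++ PySem.Int.toStr by_ ++ "\" x2=\"" ++ PySem.Int.toStr cx ++ "\" y2=\"" ++ PySem.Int.toStr cy ++ "\" stroke=\"" ++ col ++ "\" stroke-width=\"4\" stroke-linecap=\"round\"/>"

def hand_svg_py_alt (thumb : Int) (index : Int) (middle : Int) (ring : Int) (pinky : Int) (highlight_color : String) : String :=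
  let table : List (Int × Int × Int × Int × Int × Int × Int) :=
    [(24, 45, 20, 12, 23, 38, index),
     (29, 43, 28, 8, 28, 36, middle),
     (34, 44, 36, 12, 33, 37, ring),
     (38, 47, 44, 20, 38, 40, pinky),
     (19, 52, 10, 42, 14, 46, thumb)]
  "<svg xmlns=\"http://www.w3.org/2000/svg\" viewBox=\"0 0 60 80\" width=\"60\" height=\"80\">" ++
  "<rect x=\"18\" y=\"45\" width=\"24\" height=\"20\" rx=\"4\" fill=\"#1a3040\"/>" ++
  "<ellipse cx=\"30\" cy=\"65\" rx=\"12\" ry=\"8\" fill=\"#1a3040\"/>" ++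
  String.join (table.map (fun r => match r with
    | (bx, by_, tx, ty, cx, cy, s) => pvFingerB bx by_ tx ty cx cy s highlight_color)) ++
  "</svg>"


-- ===== PRECONDITION & SPEC =====
def Spec_hand_svg_py (thumb : Int) (index : Int) (middle : Int) (ring : Int) (pinky : Int) (highlight_color : String) (out : String) : Prop := out = hand_svg_py_alt thumb index middle ring pinky highlight_color
instance (thumb : Int) (index : Int) (middle : Int) (ring : Int) (pinky : Int) (highlight_color : String) (out : String) : Decidable (Spec_hand_svg_py thumb index middle ring pinky highlight_color out) := by unfold Spec_hand_svg_py; infer_instance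

-- ===== CLAIM (what is proved, stated in full; the proofs are below) =====
def Claim_equal_hand_svg_py : Prop := ∀ (thumb : Int) (index : Int) (middle : Int) (ring : Int) (pinky : Int) (highlight_color : String), Dom_hand_svg_py thumb index middle ring pinky highlight_color → Spec_hand_svg_py thumb index middle ring pinky highlight_color (hand_svg_py thumb index middle ring pinky highlight_color)

-- ===== LEMMAS AND PROOFS =====

theorem pv_append_ite (c : Prop) [Decidable c] (a x y : List String) :
    (if c then a ++ x else a ++ y) = a ++ (if c then x else y) := by
  split_ifs <;> rfl

theorem pv_join_cons (h : String) (t : List String) :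
    String.join (h :: t) = h ++ String.join t := by
  induction t generalizing h with
  | nil => apply String.ext; simp [String.join]
  | cons a t ih =>
      have h1 := ih a
      have h2 := ih (h ++ a)
      apply String.ext
      simp only [String.join, List.foldl] at h1 h2 ⊢
      have e : "" ++ h ++ a = "" ++ (h ++ a) := by apply String.ext; simp
      rw [e, h2, h1]
      simp

theorem pv_join_append (l1 l2 : List String) :
    String.join (l1 ++ l2) = String.join l1 ++ String.join l2 := by
  induction l1 with
  | nil => apply String.ext; simp [String.join]
  | cons h t ih =>
      rw [List.cons_append, pv_join_cons, pv_join_cons, ih]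
      apply String.ext; simp

theorem pv_join_finger (bx by_ tx ty cx cy s : Int) (hc : String) :
    String.join (if s ≠ 0 then
        [pvFmtLineA bx by_ tx ty (if s ≠ 0 then hc else "#2a4050"),
         pvFmtCircleA tx ty (if s ≠ 0 then hc else "#2a4050")]
      else [pvFmtLineA bx by_ cx cy (if s ≠ 0 then hc else "#2a4050")])
      = pvFingerB bx by_ tx ty cx cy s hc := by
  by_cases h : s = 0 <;>
    (apply String.ext;
     simp [h, pvFingerB, pvFmtLineA, pvFmtCircleA, String.join, List.foldl])

-- ===== VERDICT (by name: the statement is the Claim_ definition above) =====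
set_option maxRecDepth 4000 in
theorem hand_svg_py_spec : Claim_equal_hand_svg_py := by
  intro thumb index middle ring pinky hc _
  unfold Spec_hand_svg_py
  simp only [hand_svg_py, hand_svg_py_alt, List.map, List.zip, List.zipWith,
    List.foldl, pv_append_ite, pv_join_append, pv_join_finger]
  apply String.ext
  simp [String.join, List.foldl]
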